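-- pv_equiv track=rewrite | github.com/JulieCJWu/siWalk | src/create_more_features.py | lone_bulge
-- ===== SOURCE A (Python) =====
-- def lone_bulge(seq, fold):
--   """Count A/T/C/G at the center of lone-bulge motifs ).), (.(, ).( in the fold string."""
--   d = {'A':0, 'T':0, 'C':0, 'G':0,}
--   patterns = [').)', '(.(', ').(']
--   for pattern in patterns:
--     matches = find_all_overlapping_matches(fold, pattern)
--     for i in matches:
--       mid_nucleotide = seq[i+1]
--       if mid_nucleotide not in ['A', 'T', 'C', 'G']: continue
--       d[mid_nucleotide] += 1
--   return d
--
-- def find_all_overlapping_matches(seq, substring):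
--   """Return start indices of all overlapping occurrences of *substring* in *seq*."""
--   matches = []
--   start = 0
--   while start < len(seq):
--     start = seq.find(substring, start)
--     if start == -1:
--         break
--     matches.append(start)
--     start += 1
--   return matches
-- ===== SOURCE B (Python) =====
-- def lone_bulge(seq, fold):
--   """Count A/T/C/G at the center of lone-bulge motifs ).), (.(, ).( in the fold string."""
--   d = {'A': 0, 'T': 0, 'C': 0, 'G': 0}
--   patterns = {').)', '(.(', ').('}
--   for i in range(len(fold) - 2):
--     if fold[i:i+3] in patterns:
--       m = seq[i+1]
--       if m in d:
--         d[m] += 1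
--   return d
-- ===== Notes on version B (the rewrite author's own statement) =====
-- stated objective: simpler
-- what changed: One left-to-right pass over the fold testing each 3-char window against the pattern set, instead of three separate repeated str.find scans via a find_all_overlapping_matches helper.
import Mathlib
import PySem

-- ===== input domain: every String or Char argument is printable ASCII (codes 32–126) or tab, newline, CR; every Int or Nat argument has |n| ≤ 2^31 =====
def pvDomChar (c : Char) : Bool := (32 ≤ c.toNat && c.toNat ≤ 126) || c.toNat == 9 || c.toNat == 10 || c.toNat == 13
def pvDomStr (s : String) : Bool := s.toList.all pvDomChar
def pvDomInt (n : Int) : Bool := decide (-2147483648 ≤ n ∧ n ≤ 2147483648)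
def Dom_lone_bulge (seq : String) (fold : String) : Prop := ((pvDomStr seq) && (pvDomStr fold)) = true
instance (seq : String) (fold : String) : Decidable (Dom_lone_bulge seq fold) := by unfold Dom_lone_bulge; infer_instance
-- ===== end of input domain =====

-- B replaces A's three repeated str.find scans (via a find_all_overlapping_matches helper)
-- by a single left-to-right pass testing each 3-char window of the fold; objective: simpler.


-- ===== PORT A =====
-- the while-loop of find_all_overlapping_matches; fuel (= len(s)+1) only makes the
-- same computation total: 'start' grows by ≥ 1 per iteration, so the fuel never runs out
def pvFindLoop (s : String) (substring : String) : Nat → Int → List Int → List Int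
  | 0, _, ms => ms
  | fuel + 1, start, ms =>
    if start < PySem.Str.len s then
      let start' := PySem.Str.findFrom s substring start none
      if start' = -1 then ms
      else pvFindLoop s substring fuel (start' + 1) (ms ++ [start'])
    else ms

def find_all_overlapping_matches (s : String) (substring : String) : List Int :=
  pvFindLoop s substring (s.toList.length + 1) 0 []

-- loop body of A: mid_nucleotide = seq[i+1]; guard; d[mid] += 1
def pvUpdA (seq : String) (d : PySem.Dict String Int) (i : Int) : PySem.Dict String Int :=
  match PySem.Str.pyGet? seq (i + 1) with
  | none => d   -- Python raises IndexError here; such inputs are excluded by Pre_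
  | some mid =>
    if String.ofList [mid] ∉ (["A", "T", "C", "G"] : List String) then d
    else d.modify (String.ofList [mid]) 0 (· + 1)

def lone_bulge (seq : String) (fold : String) : List (String × Int) :=
  let d0 : PySem.Dict String Int := PySem.Dict.ofList [("A", 0), ("T", 0), ("C", 0), ("G", 0)]
  let patterns : List String := [").)", "(.(", ").("]
  let d := patterns.foldl
    (fun d pattern => (find_all_overlapping_matches fold pattern).foldl (pvUpdA seq) d) d0
  d.items

-- ===== PORT B =====
-- loop body of B: test the 3-char window, then count the center nucleotide if it is a key
def pvUpdB (seq : String) (fold : String) (patterns : PySem.Set String)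
    (d : PySem.Dict String Int) (i : Int) : PySem.Dict String Int :=
  if patterns.contains (PySem.Str.slice fold (some i) (some (i + 3))) then
    match PySem.Str.pyGet? seq (i + 1) with
    | none => d   -- Python raises IndexError here; such inputs are excluded by Pre_
    | some m =>
      if d.contains (String.ofList [m]) then d.modify (String.ofList [m]) 0 (· + 1) else d
  else d

def lone_bulge_alt (seq : String) (fold : String) : List (String × Int) :=
  let d0 : PySem.Dict String Int := PySem.Dict.ofList [("A", 0), ("T", 0), ("C", 0), ("G", 0)]
  let patterns : PySem.Set String := PySem.Set.ofList [").)", "(.(", ").("]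
  let d := (PySem.List.pyRange 0 (PySem.Str.len fold - 2) 1).foldl (pvUpdB seq fold patterns) d0
  d.items

-- ===== PRECONDITION & SPEC =====
-- Pre_ excludes exactly the inputs where Python A raises IndexError: a motif match in the
-- fold whose center position i+1 is not an index into seq.
def Pre_lone_bulge (seq : String) (fold : String) : Prop :=
  ∀ i : Nat, i < fold.toList.length →
    ((").)").toList <+: fold.toList.drop i ∨ ("(.(").toList <+: fold.toList.drop i ∨
      (").(").toList <+: fold.toList.drop i) →
    i + 1 < seq.toList.length
instance (seq : String) (fold : String) : Decidable (Pre_lone_bulge seq fold) := by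
  unfold Pre_lone_bulge; infer_instance

def pvWitness_lone_bulge : String × String := ("CAG", "(.(")

def Spec_lone_bulge (seq : String) (fold : String) (out : List (String × Int)) : Prop := out = lone_bulge_alt seq fold
instance (seq : String) (fold : String) (out : List (String × Int)) : Decidable (Spec_lone_bulge seq fold out) := by unfold Spec_lone_bulge; infer_instance

-- ===== CLAIM (what is proved, stated in full; the proofs are below) =====
def Claim_equal_lone_bulge : Prop := ∀ (seq : String) (fold : String), Dom_lone_bulge seq fold → Pre_lone_bulge seq fold → Spec_lone_bulge seq fold (lone_bulge seq fold)

-- ===== LEMMAS AND PROOFS =====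

-- the predicate "pattern pat occurs (as a prefix) at position i of the fold"
def pvOcc (fold : List Char) (pat : List Char) (i : Nat) : Bool := decide (pat <+: fold.drop i)

-- the predicate "seq[i+1] is the nucleotide x"
def pvMidIs (seq : List Char) (x : Char) (i : Nat) : Bool := seq[i + 1]? == some x

theorem pv_not_infix_not_occ {s sub : List Char} {k i : Nat} (hki : k ≤ i)
    (hno : ¬ sub <:+: s.drop k) : ¬ pvOcc s sub i = true := by
  simp only [pvOcc, decide_eq_true_eq]
  intro hpre
  apply hno
  have : s.drop i = (s.drop k).drop (i - k) := by rw [List.drop_drop]; congr 1; omega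
  rw [this] at hpre
  exact hpre.isInfix.trans (List.drop_suffix _ _).isInfix

-- the find_all_overlapping_matches while-loop returns exactly the occurrence positions, in order
theorem pvFindLoop_spec (s sub : String) (hsub : sub.toList ≠ []) :
    ∀ (fuel k : Nat) (acc : List Int), s.toList.length - k < fuel → k ≤ s.toList.length →
    pvFindLoop s sub fuel (k : Int) acc =
      acc ++ ((List.range' k (s.toList.length - k)).filter (pvOcc s.toList sub.toList)).map
        Int.ofNat := by
  intro fuel
  induction fuel with
  | zero => intro k acc h hk; omega
  | succ fuel ih =>
    intro k acc h hk
    by_cases hks : k < s.toList.length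
    · rw [pvFindLoop]
      simp only [PySem.Str.len_eq, PySem.Str.findFrom_eq]
      rw [if_pos (by exact_mod_cast hks)]
      by_cases hf : PySem.Chars.findFrom s.toList sub.toList (k : Int) none = -1
      · rw [if_pos hf]
        have hno : ¬ sub.toList <:+: s.toList.drop k :=
          (PySem.Chars.findFrom_natCast_eq_neg_one_iff s.toList sub.toList k hk).mp hf
        have : (List.range' k (s.toList.length - k)).filter (pvOcc s.toList sub.toList) = [] := by
          rw [List.filter_eq_nil_iff]
          intro i hi
          exact pv_not_infix_not_occ (List.mem_range'_1.mp hi).1 hno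
        rw [this]; simp
      · rw [if_neg hf]
        obtain ⟨hkf, hpre, hmin⟩ :=
          PySem.Chars.findFrom_natCast_spec s.toList sub.toList k hk hf
        set f := PySem.Chars.findFrom s.toList sub.toList (k : Int) none with hfdef
        have hf0 : (0:Int) ≤ f := le_trans (by exact_mod_cast Nat.zero_le k) hkf
        have hfj : f = ((f.toNat : Nat) : Int) := (Int.toNat_of_nonneg hf0).symm
        set j := f.toNat with hjdef
        have hkj : k ≤ j := by omega
        have hjlen : j < s.toList.length := by
          by_contra hle
          rw [List.drop_eq_nil_iff.mpr (by omega)] at hpre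
          exact hsub (List.prefix_nil.mp hpre)
        have hstep : f + 1 = (((j + 1 : Nat)) : Int) := by omega
        rw [hstep, ih (j+1) (acc ++ [f]) (by omega) (by omega)]
        have hsplit : List.range' k (s.toList.length - k) =
            List.range' k (j - k) ++ [j] ++ List.range' (j+1) (s.toList.length - (j+1)) := by
          have h1 : List.range' k (j - k) ++ List.range' j (1 + (s.toList.length - (j+1))) =
              List.range' k ((j - k) + (1 + (s.toList.length - (j+1)))) := by
            have := @List.range'_append k (j - k) (1 + (s.toList.length - (j+1))) 1
            simpa [Nat.add_sub_cancel' hkj] using this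
          rw [show (1 + (s.toList.length - (j+1))) = (s.toList.length - (j+1)) + 1 from by omega,
            List.range'_succ] at h1
          simp only [List.append_assoc]
          have h2 : (j - k) + ((s.toList.length - (j+1)) + 1) = s.toList.length - k := by omega
          rw [h2] at h1
          rw [← h1]
          simp
        rw [hsplit]
        have hfilter1 : (List.range' k (j - k)).filter (pvOcc s.toList sub.toList) = [] := by
          rw [List.filter_eq_nil_iff]
          intro i hi
          have := List.mem_range'_1.mp hi
          simp only [pvOcc, decide_eq_true_eq]
          exact hmin i this.1 (by omega)
        have hfilterj : pvOcc s.toList sub.toList j = true := by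
          simp [pvOcc]; exact hpre
        simp [List.filter_append, hfilter1, hfilterj, hfj]
    · rw [pvFindLoop]
      simp only [PySem.Str.len_eq]
      rw [if_neg (by exact_mod_cast hks)]
      rw [show s.toList.length - k = 0 from by omega]
      simp

theorem find_all_spec (s sub : String) (hsub : sub.toList ≠ []) :
    find_all_overlapping_matches s sub =
      ((List.range s.toList.length).filter (pvOcc s.toList sub.toList)).map Int.ofNat := by
  rw [find_all_overlapping_matches,
    show (0 : Int) = ((0 : Nat) : Int) from rfl,
    pvFindLoop_spec s sub hsub (s.toList.length + 1) 0 [] (by omega) (by omega)]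
  simp [List.range_eq_range']

theorem pv_ofList_inj {l l' : List Char} : String.ofList l = String.ofList l' ↔ l = l' :=
  ⟨fun h => by have := congrArg String.toList h; simpa using this, fun h => by rw [h]⟩

theorem pv_mem_keys (c : Char) :
    (String.ofList [c] ∈ (["A", "T", "C", "G"] : List String)) ↔
      c ∈ (['A','T','C','G'] : List Char) := by
  rw [show (["A", "T", "C", "G"] : List String) =
    ['A','T','C','G'].map (fun c => String.ofList [c]) from rfl, List.mem_map]
  constructor
  · rintro ⟨a, ha, he⟩
    rw [pv_ofList_inj] at he
    simp only [List.cons.injEq] at he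
    exact he.1 ▸ ha
  · intro hc; exact ⟨c, hc, rfl⟩

-- one step of A's loop body, read off on the value at key x
theorem pv_updA_getD (seq : String) (x : Char) (hx : x ∈ (['A','T','C','G'] : List Char))
    (d : PySem.Dict String Int) (i : Int) :
    (pvUpdA seq d i).getD (String.ofList [x]) 0 =
      d.getD (String.ofList [x]) 0 +
        (if PySem.Str.pyGet? seq (i + 1) == some x then (1:Int) else 0) := by
  rcases h : PySem.Str.pyGet? seq (i + 1) with _ | c
  · simp only [pvUpdA, h]; simp
  · simp only [pvUpdA, h]
    by_cases hc : String.ofList [c] ∈ (["A", "T", "C", "G"] : List String)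
    · rw [if_neg (by simp only [not_not]; exact hc)]
      rw [PySem.Dict.getD_modify]
      by_cases hxc : x = c
      · subst hxc; simp
      · rw [if_neg (fun he => hxc (by simpa [pv_ofList_inj] using he))]
        have : (c == x) = false := by simp; exact fun he => hxc he.symm
        simp [this]
    · rw [if_pos hc]
      have hxc : (c == x) = false := by
        simp; exact fun he => hc (he ▸ (pv_mem_keys x).mpr hx)
      simp [hxc]

theorem pv_keys_updA (seq : String) (d : PySem.Dict String Int) (i : Int)
    (hd : d.keys = ["A", "T", "C", "G"]) : (pvUpdA seq d i).keys = ["A", "T", "C", "G"] := by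
  rcases h : PySem.Str.pyGet? seq (i + 1) with _ | c
  · simp only [pvUpdA, h]; exact hd
  · simp only [pvUpdA, h]
    by_cases hc : String.ofList [c] ∈ (["A", "T", "C", "G"] : List String)
    · rw [if_neg (by simp only [not_not]; exact hc)]
      rw [PySem.Dict.keys_modify, PySem.Dict.keys_insert_of_contains]
      · exact hd
      · rw [PySem.Dict.contains_iff_mem_keys, hd]; exact hc
    · rw [if_pos hc]; exact hd

theorem pv_foldl_updA (seq : String) (x : Char) (hx : x ∈ (['A','T','C','G'] : List Char)) :
    ∀ (L : List Int) (d : PySem.Dict String Int),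
    (L.foldl (pvUpdA seq) d).getD (String.ofList [x]) 0 =
      d.getD (String.ofList [x]) 0 +
        (L.countP (fun i => PySem.Str.pyGet? seq (i + 1) == some x) : Int) := by
  intro L
  induction L with
  | nil => simp
  | cons i L ih =>
    intro d
    rw [List.foldl_cons, ih, pv_updA_getD seq x hx, List.countP_cons]
    push_cast
    by_cases hp : PySem.Str.pyGet? seq (i + 1) == some x <;> simp [hp] <;> ring

theorem pv_keys_foldl_updA (seq : String) :
    ∀ (L : List Int) (d : PySem.Dict String Int), d.keys = ["A", "T", "C", "G"] →
    (L.foldl (pvUpdA seq) d).keys = ["A", "T", "C", "G"] := by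
  intro L
  induction L with
  | nil => intro d hd; simpa using hd
  | cons i L ih => intro d hd; rw [List.foldl_cons]; exact ih _ (pv_keys_updA seq d i hd)

-- the filter predicate B applies inside the loop, with the nucleotide test at key x
def pvPredB (seq : String) (fold : String) (patterns : PySem.Set String) (x : Char) (i : Int) :
    Bool :=
  patterns.contains (PySem.Str.slice fold (some i) (some (i + 3))) &&
    (PySem.Str.pyGet? seq (i + 1) == some x)

-- one step of B's loop body: keys are preserved and the value at key x counts pvPredB
theorem pv_updB_step (seq fold : String) (pats : PySem.Set String) (x : Char)
    (hx : x ∈ (['A','T','C','G'] : List Char)) (d : PySem.Dict String Int) (i : Int)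
    (hd : d.keys = ["A", "T", "C", "G"]) :
    (pvUpdB seq fold pats d i).keys = ["A", "T", "C", "G"] ∧
    (pvUpdB seq fold pats d i).getD (String.ofList [x]) 0 =
      d.getD (String.ofList [x]) 0 + (if pvPredB seq fold pats x i then (1:Int) else 0) := by
  by_cases hs : pats.contains (PySem.Str.slice fold (some i) (some (i + 3)))
  · rcases h : PySem.Str.pyGet? seq (i + 1) with _ | c
    · simp only [pvUpdB, hs, if_true, h, pvPredB]
      refine ⟨hd, ?_⟩
      simp
    · simp only [pvUpdB, hs, if_true, h, pvPredB]
      by_cases hdc : d.contains (String.ofList [c])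
      · rw [if_pos hdc]
        refine ⟨?_, ?_⟩
        · rw [PySem.Dict.keys_modify, PySem.Dict.keys_insert_of_contains _ _ hdc]; exact hd
        · rw [PySem.Dict.getD_modify]
          by_cases hxc : x = c
          · subst hxc; simp
          · rw [if_neg (fun he => hxc (by simpa [pv_ofList_inj] using he))]
            have : (c == x) = false := by simp; exact fun he => hxc he.symm
            simp [this]
      · rw [if_neg hdc]
        refine ⟨hd, ?_⟩
        have hxc : (c == x) = false := by
          simp
          intro he; subst he
          exact hdc ((PySem.Dict.contains_iff_mem_keys _ _).mpr (hd ▸ (pv_mem_keys c).mpr hx))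
        simp [hxc]
  · simp only [pvUpdB, hs, if_false, pvPredB]
    refine ⟨hd, ?_⟩
    simp [hs]

theorem pv_foldl_updB (seq fold : String) (pats : PySem.Set String) (x : Char)
    (hx : x ∈ (['A','T','C','G'] : List Char)) :
    ∀ (L : List Int) (d : PySem.Dict String Int), d.keys = ["A", "T", "C", "G"] →
    (L.foldl (pvUpdB seq fold pats) d).keys = ["A", "T", "C", "G"] ∧
    (L.foldl (pvUpdB seq fold pats) d).getD (String.ofList [x]) 0 =
      d.getD (String.ofList [x]) 0 + (L.countP (pvPredB seq fold pats x) : Int) := by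
  intro L
  induction L with
  | nil => intro d hd; exact ⟨hd, by simp⟩
  | cons i L ih =>
    intro d hd
    obtain ⟨hk, hg⟩ := pv_updB_step seq fold pats x hx d i hd
    obtain ⟨hk', hg'⟩ := ih _ hk
    refine ⟨hk', ?_⟩
    rw [List.foldl_cons, hg', hg, List.countP_cons]
    push_cast
    by_cases hp : pvPredB seq fold pats x i = true <;> simp [hp] <;> ring

-- the 3-char window at k equals p iff p occurs at k
theorem pv_slice_eq_iff (fold : String) (k : Nat) (p : String) (hp : p.toList.length = 3) :
    (PySem.Str.slice fold (some (k : Int)) (some ((k : Int) + 3)) = p) ↔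
      pvOcc fold.toList p.toList k = true := by
  rw [← String.toList_inj, PySem.Str.toList_slice, PySem.Chars.slice_eq_listSlice]
  rw [show ((k : Int) + 3) = ((k + 3 : Nat) : Int) from by push_cast; ring]
  rw [PySem.List.slice_natCast, show k + 3 - k = 3 from by omega]
  rw [pvOcc, decide_eq_true_eq, List.prefix_iff_eq_take, hp, eq_comm]

-- occurrence of a 3-char pattern needs 3 characters of room
theorem pv_occ_room {fold pat : List Char} {i : Nat} (hp : pat.length = 3)
    (h : pvOcc fold pat i = true) : i + 3 ≤ fold.length := by
  rw [pvOcc, decide_eq_true_eq] at h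
  have := h.length_le
  rw [hp, List.length_drop] at this
  omega

-- distinct equal-length patterns cannot both occur at the same position
theorem pv_occ_disj {fold p p' : List Char} {i : Nat} (hne : p ≠ p') (hl : p.length = p'.length) :
    ¬(pvOcc fold p i = true ∧ pvOcc fold p' i = true) := by
  rintro ⟨h1, h2⟩
  rw [pvOcc, decide_eq_true_eq, List.prefix_iff_eq_take] at h1 h2
  exact hne (by rw [h1, h2, hl])

-- a countP over range n of a predicate dead above n-2 is a countP over range (n-2)
theorem pv_countP_trim (q : Nat → Bool) (n : Nat) (h : ∀ i, q i = true → i + 3 ≤ n) :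
    (List.range n).countP q = (List.range (n - 2)).countP q := by
  conv_lhs => rw [show n = (n - 2) + (n - (n - 2)) from by omega]
  rw [List.range_add, List.countP_append, List.countP_map]
  have : (List.range (n - (n - 2))).countP (q ∘ fun x => n - 2 + x) = 0 := by
    rw [List.countP_eq_zero]
    intro a _ hq
    simp only [Function.comp_apply] at hq
    have := h _ hq
    omega
  rw [this, Nat.add_zero]

-- a countP of a disjunction of pairwise-disjoint tests splits into a sum
theorem pv_countP_or3 (q1 q2 q3 m : Nat → Bool) (L : List Nat)
    (h12 : ∀ i, ¬(q1 i = true ∧ q2 i = true)) (h13 : ∀ i, ¬(q1 i = true ∧ q3 i = true))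
    (h23 : ∀ i, ¬(q2 i = true ∧ q3 i = true)) :
    L.countP (fun i => (q1 i || q2 i || q3 i) && m i) =
      L.countP (fun i => q1 i && m i) + L.countP (fun i => q2 i && m i) +
        L.countP (fun i => q3 i && m i) := by
  induction L with
  | nil => simp
  | cons a L ih =>
    simp only [List.countP_cons]
    cases hq1 : q1 a <;> cases hq2 : q2 a <;> cases hq3 : q3 a <;> cases hm : m a <;>
      simp only [hq1, hq2, hq3, hm, ih] <;>
      first
        | simp <;> omega
        | (exfalso; first | exact h12 a ⟨hq1, hq2⟩ | exact h13 a ⟨hq1, hq3⟩ | exact h23 a ⟨hq2, hq3⟩)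

-- A's per-pattern count over the matches list, as a countP over range
theorem pv_countA (seq fold : String) (x : Char) (p : String) (hp : p.toList ≠ []) :
    (find_all_overlapping_matches fold p).countP
        (fun i => PySem.Str.pyGet? seq (i + 1) == some x) =
      (List.range fold.toList.length).countP
        (fun i => pvOcc fold.toList p.toList i && pvMidIs seq.toList x i) := by
  rw [find_all_spec fold p hp, List.countP_map, List.countP_filter]
  apply List.countP_congr
  intro i _
  simp only [Function.comp_apply, pvMidIs]
  rw [show (Int.ofNat i) + 1 = ((i + 1 : Nat) : Int) from by
      rw [Int.ofNat_eq_natCast]; push_cast; ring,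
    PySem.Str.pyGet?_natCast, Bool.and_comm]

-- the central count identity: A's three scans count the same events as B's one pass
theorem pv_count_eq (seq fold : String) (x : Char) :
    (find_all_overlapping_matches fold ").)" ++ (find_all_overlapping_matches fold "(.(" ++
        find_all_overlapping_matches fold ").(")).countP
        (fun i => PySem.Str.pyGet? seq (i + 1) == some x) =
      (PySem.List.pyRange 0 (PySem.Str.len fold - 2) 1).countP
        (pvPredB seq fold (PySem.Set.ofList [").)", "(.(", ").("]) x) := by
  have hb : (PySem.Str.len fold - 2 - 0).toNat = fold.toList.length - 2 := by
    rw [PySem.Str.len_eq]; omega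
  have hpt : ∀ k : Nat, (pvPredB seq fold (PySem.Set.ofList [").)", "(.(", ").("]) x ∘
      fun k : Nat => (0 : Int) + (k : Int)) k =
      ((pvOcc fold.toList (").)").toList k || pvOcc fold.toList ("(.(").toList k ||
        pvOcc fold.toList (").(").toList k) && pvMidIs seq.toList x k) := by
    intro k
    simp only [Function.comp_apply, zero_add, pvPredB]
    congr 1
    · rw [Bool.eq_iff_iff, PySem.Set.contains_iff, PySem.Set.mem_ofList]
      simp only [List.mem_cons, List.not_mem_nil, or_false]
      rw [pv_slice_eq_iff fold k ").)" rfl, pv_slice_eq_iff fold k "(.(" rfl,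
        pv_slice_eq_iff fold k ").(" rfl]
      simp only [Bool.or_eq_true]
      tauto
    · rw [show ((k : Int) + 1) = ((k + 1 : Nat) : Int) from by omega,
        PySem.Str.pyGet?_natCast]
      rfl
  have h1 : (List.range (fold.toList.length - 2)).countP
      (pvPredB seq fold (PySem.Set.ofList [").)", "(.(", ").("]) x ∘
        fun k : Nat => (0 : Int) + (k : Int)) =
      (List.range (fold.toList.length - 2)).countP
      (fun i => (pvOcc fold.toList (").)").toList i || pvOcc fold.toList ("(.(").toList i ||
        pvOcc fold.toList (").(").toList i) && pvMidIs seq.toList x i) :=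
    List.countP_congr (fun a _ => by rw [hpt a])
  have h2 : (List.range (fold.toList.length - 2)).countP
      (fun i => (pvOcc fold.toList (").)").toList i || pvOcc fold.toList ("(.(").toList i ||
        pvOcc fold.toList (").(").toList i) && pvMidIs seq.toList x i) =
      (List.range (fold.toList.length - 2)).countP
        (fun i => pvOcc fold.toList (").)").toList i && pvMidIs seq.toList x i) +
      (List.range (fold.toList.length - 2)).countP
        (fun i => pvOcc fold.toList ("(.(").toList i && pvMidIs seq.toList x i) +
      (List.range (fold.toList.length - 2)).countP
        (fun i => pvOcc fold.toList (").(").toList i && pvMidIs seq.toList x i) :=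
    pv_countP_or3 _ _ _ _ _
      (fun i => pv_occ_disj (by decide) (by decide))
      (fun i => pv_occ_disj (by decide) (by decide))
      (fun i => pv_occ_disj (by decide) (by decide))
  have h3 := pv_countP_trim
    (fun i => pvOcc fold.toList (").)").toList i && pvMidIs seq.toList x i) fold.toList.length
    (fun i h => pv_occ_room rfl (by simp only [Bool.and_eq_true] at h; exact h.1))
  have h4 := pv_countP_trim
    (fun i => pvOcc fold.toList ("(.(").toList i && pvMidIs seq.toList x i) fold.toList.length
    (fun i h => pv_occ_room rfl (by simp only [Bool.and_eq_true] at h; exact h.1))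
  have h5 := pv_countP_trim
    (fun i => pvOcc fold.toList (").(").toList i && pvMidIs seq.toList x i) fold.toList.length
    (fun i h => pv_occ_room rfl (by simp only [Bool.and_eq_true] at h; exact h.1))
  rw [List.countP_append, List.countP_append,
    pv_countA seq fold x ").)" (by decide), pv_countA seq fold x "(.(" (by decide),
    pv_countA seq fold x ").(" (by decide)]
  rw [PySem.List.pyRange_one, hb, List.countP_map, h1, h2]
  omega

-- both loops produce the same four items
theorem pv_main (seq fold : String) :
    ((find_all_overlapping_matches fold ").)" ++ (find_all_overlapping_matches fold "(.(" ++
        find_all_overlapping_matches fold ").(")).foldl (pvUpdA seq)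
        (PySem.Dict.ofList [("A",0),("T",0),("C",0),("G",0)])).items =
      ((PySem.List.pyRange 0 (PySem.Str.len fold - 2) 1).foldl
        (pvUpdB seq fold (PySem.Set.ofList [").)", "(.(", ").("]))
        (PySem.Dict.ofList [("A",0),("T",0),("C",0),("G",0)])).items := by
  set d0 : PySem.Dict String Int := PySem.Dict.ofList [("A",0),("T",0),("C",0),("G",0)] with hd0
  have hd0k : d0.keys = ["A", "T", "C", "G"] := by rw [hd0]; decide
  set LA := find_all_overlapping_matches fold ").)" ++ (find_all_overlapping_matches fold "(.(" ++
    find_all_overlapping_matches fold ").(") with hLA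
  set LB := PySem.List.pyRange 0 (PySem.Str.len fold - 2) 1 with hLB
  set pats : PySem.Set String := PySem.Set.ofList [").)", "(.(", ").("] with hpats
  have hKA := pv_keys_foldl_updA seq LA d0 hd0k
  have hKB := (pv_foldl_updB seq fold pats 'A' (by decide) LB d0 hd0k).1
  rw [PySem.Dict.items_eq_map_keys _ (by rw [hKA]; decide) 0,
    PySem.Dict.items_eq_map_keys _ (by rw [hKB]; decide) 0, hKA, hKB]
  simp only [List.map_cons, List.map_nil]
  have hval : ∀ x : Char, x ∈ (['A','T','C','G'] : List Char) →
      (LA.foldl (pvUpdA seq) d0).getD (String.ofList [x]) 0 =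
      (LB.foldl (pvUpdB seq fold pats) d0).getD (String.ofList [x]) 0 := by
    intro x hx
    rw [pv_foldl_updA seq x hx, (pv_foldl_updB seq fold pats x hx LB d0 hd0k).2,
      hLA, hLB, hpats, pv_count_eq seq fold x]
  have hA := hval 'A' (by decide)
  have hT := hval 'T' (by decide)
  have hC := hval 'C' (by decide)
  have hG := hval 'G' (by decide)
  rw [show ("A" : String) = String.ofList ['A'] from rfl,
    show ("T" : String) = String.ofList ['T'] from rfl,
    show ("C" : String) = String.ofList ['C'] from rfl,
    show ("G" : String) = String.ofList ['G'] from rfl,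
    hA, hT, hC, hG]

-- ===== VERDICT (by name: the statement is the Claim_ definition above) =====
theorem lone_bulge_spec : Claim_equal_lone_bulge := by
  intro seq fold _ _
  unfold Spec_lone_bulge lone_bulge lone_bulge_alt
  simp only [List.foldl_cons, List.foldl_nil]
  rw [← List.foldl_append, ← List.foldl_append]
  exact pv_main seq fold
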